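-- pv_equiv track=rewrite | github.com/lost-person/leet-code | company/旋转相同单词数.py | solve
-- ===== SOURCE A (Python) =====
-- def solve(letter: str, K: int) -> int:
--     if not letter: return -1
--
--     def rotate(s: int, K: int):
--         if not s: return False
--
--         n = len(s)
--         if n == 1 or K == 0: return True
--
--         for i in range(n):
--             rotate_index = (i + K) % n
--             if s[i] != s[rotate_index]:
--                 return False
--
--         return True
--
--     res = 0
--
--     word_list = letter.split(" ")
--     for word in word_list:
--         if rotate(word, K):
--             res += 1
--
--     return res
-- ===== SOURCE B (Python) =====
-- def solve(letter: str, K: int) -> int: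
--     if not letter:
--         return -1
--
--     def invariant(w: str) -> bool:
--         if not w:
--             return False
--         m = K % len(w)
--         return w == w[m:] + w[:m]
--
--     return sum(1 for w in letter.split(" ") if invariant(w))
-- ===== Notes on version B (the rewrite author's own statement) =====
-- stated objective: simpler
-- what changed: Replaces A's per-index loop comparing s[i] with s[(i+K)%n] (plus its n==1 and K==0 shortcuts) by a single rotated-string construction: normalise m = K % n once and test w == w[m:] + w[:m]; the word count becomes a one-line sum over the split.
import Mathlib
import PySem

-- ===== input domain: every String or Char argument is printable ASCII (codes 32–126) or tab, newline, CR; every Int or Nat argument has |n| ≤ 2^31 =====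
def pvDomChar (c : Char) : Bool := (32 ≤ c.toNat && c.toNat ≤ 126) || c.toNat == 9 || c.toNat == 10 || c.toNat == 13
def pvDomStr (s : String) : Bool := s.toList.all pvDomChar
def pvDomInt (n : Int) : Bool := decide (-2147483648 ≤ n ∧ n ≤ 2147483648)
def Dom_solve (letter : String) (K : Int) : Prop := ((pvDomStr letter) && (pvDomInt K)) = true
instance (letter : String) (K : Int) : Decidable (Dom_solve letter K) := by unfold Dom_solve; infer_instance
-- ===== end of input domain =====

-- B replaces A's per-index rotation check by one rotated-string build-and-compare; objective: simpler.

-- ===== PORT A =====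
-- the body of `for i in range(n): if s[i] != s[rotate_index]: return False` (early return on mismatch)
def pvRotLoopA (s : List Char) (n : Int) (K : Int) : List Int → Bool
  | [] => true
  | i :: rest =>
    if PySem.List.pyGet? s i ≠ PySem.List.pyGet? s (PySem.Int.mod (i + K) n) then false
    else pvRotLoopA s n K rest

-- the inner helper `rotate(s, K)` of A
def pvRotateA (s : List Char) (K : Int) : Bool :=
  if s = [] then false
  else
    let n : Int := PySem.List.len s
    if n = 1 ∨ K = 0 then true
    else pvRotLoopA s n K (PySem.List.pyRange 0 n 1)

def solve (letter : String) (K : Int) : Int :=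
  if letter.toList = [] then -1
  else
    (PySem.Chars.splitOn letter.toList [' ']).foldl
      (fun res w => if pvRotateA w K then res + 1 else res) 0

-- ===== PORT B =====
-- `invariant(w)`: m = K % len(w); w == w[m:] + w[:m]
def pvInvariantB (w : List Char) (K : Int) : Bool :=
  if w = [] then false
  else
    let m : Int := PySem.Int.mod K (PySem.List.len w)
    w = PySem.List.slice w (some m) none ++ PySem.List.slice w none (some m)

def solve_alt (letter : String) (K : Int) : Int :=
  if letter.toList = [] then -1
  else ((PySem.Chars.splitOn letter.toList [' ']).countP (fun w => pvInvariantB w K) : Int)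

-- ===== PRECONDITION & SPEC =====
def Spec_solve (letter : String) (K : Int) (out : Int) : Prop := out = solve_alt letter K
instance (letter : String) (K : Int) (out : Int) : Decidable (Spec_solve letter K out) := by unfold Spec_solve; infer_instance

-- ===== CLAIM (what is proved, stated in full; the proofs are below) =====
def Claim_equal_solve : Prop := ∀ (letter : String) (K : Int), Dom_solve letter K → Spec_solve letter K (solve letter K)

-- ===== LEMMAS AND PROOFS =====

-- the loop returns true iff every listed index passes the check
theorem pvRotLoopA_eq_true_iff (s : List Char) (n K : Int) (l : List Int) :
    pvRotLoopA s n K l = true ↔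
      ∀ i ∈ l, PySem.List.pyGet? s i = PySem.List.pyGet? s (PySem.Int.mod (i + K) n) := by
  induction l with
  | nil => simp [pvRotLoopA]
  | cons i rest ih =>
    simp only [pvRotLoopA]
    by_cases h : PySem.List.pyGet? s i = PySem.List.pyGet? s (PySem.Int.mod (i + K) n) <;>
      simp [h, ih]

-- list equals its rotation by m iff every index agrees with the index shifted by m
theorem rotate_eq_self_iff_getElem (w : List Char) (m : Nat) :
    w = w.rotate m ↔ ∀ i < w.length, w[i]? = w[(i + m) % w.length]? := by
  constructor
  · intro h i hi
    have hi' : i < (w.rotate m).length := by simpa using hi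
    rw [List.getElem?_eq_getElem (Nat.mod_lt _ (Nat.zero_lt_of_lt hi))]
    conv_lhs => rw [h]
    rw [List.getElem?_eq_getElem hi']
    exact congrArg some (List.getElem_rotate w m i hi')
  · intro h
    apply List.ext_getElem?
    intro i
    by_cases hi : i < w.length
    · have hi' : i < (w.rotate m).length := by simpa using hi
      rw [h i hi, List.getElem?_eq_getElem hi',
          List.getElem?_eq_getElem (Nat.mod_lt _ (Nat.zero_lt_of_lt hi))]
      exact congrArg some (List.getElem_rotate w m i hi').symm
    · rw [List.getElem?_eq_none (by omega), List.getElem?_eq_none (by simp; omega)]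

-- the Python index arithmetic reduces to Nat mod arithmetic
theorem mod_index_eq (w : List Char) (K : Int) (hw : w ≠ []) (i : Nat) :
    PySem.List.pyGet? w (PySem.Int.mod ((i : Int) + K) (PySem.List.len w)) =
      w[(i + (PySem.Int.mod K (PySem.List.len w)).toNat) % w.length]? := by
  have hpos : 0 < w.length := List.length_pos_of_ne_nil hw
  have hposI : (0 : Int) < (w.length : Int) := by exact_mod_cast hpos
  simp only [PySem.List.len_eq]
  have hm0 : 0 ≤ PySem.Int.mod K (w.length : Int) := PySem.Int.mod_nonneg K hposI
  have hmlt : PySem.Int.mod K (w.length : Int) < (w.length : Int) := PySem.Int.mod_lt K hposI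
  have hmcast : ((PySem.Int.mod K (w.length : Int)).toNat : Int)
      = PySem.Int.mod K (w.length : Int) := Int.toNat_of_nonneg hm0
  have hKmod : PySem.Int.mod K (w.length : Int) = K % (w.length : Int) :=
    PySem.Int.mod_eq_emod_of_pos hposI
  have h2 : ((PySem.Int.mod K (w.length : Int)).toNat : Int) % (w.length : Int)
      = ((PySem.Int.mod K (w.length : Int)).toNat : Int) :=
    Int.emod_eq_of_lt (by omega) (by omega)
  have key : PySem.Int.mod ((i : Int) + K) ((w.length : Nat) : Int)
      = (((i + (PySem.Int.mod K (w.length : Int)).toNat) % w.length : Nat) : Int) := by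
    rw [PySem.Int.mod_eq_emod_of_pos hposI]
    have h1 : ((i : Int) + K) % (w.length : Int)
        = ((i : Int) + ((PySem.Int.mod K (w.length : Int)).toNat : Int)) % (w.length : Int) := by
      rw [Int.add_emod, Int.add_emod (i : Int) ((PySem.Int.mod K (w.length : Int)).toNat : Int),
          h2, hmcast, hKmod]
    rw [h1]
    push_cast
    ring_nf
  rw [key, PySem.List.pyGet?_natCast]

-- core: A's rotate = B's invariant
theorem rotate_eq_invariant (w : List Char) (K : Int) :
    pvRotateA w K = pvInvariantB w K := by
  by_cases hw : w = []
  · simp [pvRotateA, pvInvariantB, hw]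
  · have hpos : 0 < w.length := List.length_pos_of_ne_nil hw
    have hposI : (0 : Int) < (w.length : Int) := by exact_mod_cast hpos
    unfold pvRotateA pvInvariantB
    simp only [PySem.List.len_eq, if_neg hw]
    have hm0 : 0 ≤ PySem.Int.mod K (w.length : Int) := PySem.Int.mod_nonneg K hposI
    have hmltI : PySem.Int.mod K (w.length : Int) < (w.length : Int) := PySem.Int.mod_lt K hposI
    have hmlt : (PySem.Int.mod K (w.length : Int)).toNat < w.length := by omega
    simp only [PySem.List.slice_from w hm0, PySem.List.slice_to w hm0,
      ← List.rotate_eq_drop_append_take hmlt.le]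
    have hiff : (w = w.rotate (PySem.Int.mod K (w.length : Int)).toNat)
        ↔ ∀ i < w.length,
            w[i]? = w[(i + (PySem.Int.mod K (w.length : Int)).toNat) % w.length]? :=
      rotate_eq_self_iff_getElem w _
    by_cases h1 : ((w.length : Int)) = 1 ∨ K = 0
    · rw [if_pos h1]
      have hmn0 : (PySem.Int.mod K (w.length : Int)).toNat = 0 := by
        rcases h1 with h1 | h1
        · have hl1 : w.length = 1 := by exact_mod_cast h1
          omega
        · subst h1
          have h0 : PySem.Int.mod 0 (w.length : Int) = 0 % (w.length : Int) :=
            PySem.Int.mod_eq_emod_of_pos hposI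
          simp at h0
          omega
      simp [hmn0]
    · rw [if_neg h1]
      have hloop : pvRotLoopA w (w.length : Int) K (PySem.List.pyRange 0 (w.length : Int) 1) = true
          ↔ (w = w.rotate (PySem.Int.mod K (w.length : Int)).toNat) := by
        rw [pvRotLoopA_eq_true_iff, hiff]
        constructor
        · intro h i hi
          have hmem : (i : Int) ∈ PySem.List.pyRange 0 (w.length : Int) 1 := by
            rw [PySem.List.mem_pyRange_one]
            exact ⟨by exact_mod_cast Nat.zero_le i, by exact_mod_cast hi⟩
          have hcall := h (i : Int) hmem
          have := mod_index_eq w K hw i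
          simp only [PySem.List.len_eq] at this
          rwa [PySem.List.pyGet?_natCast, this] at hcall
        · intro h i hmem
          rw [PySem.List.mem_pyRange_one] at hmem
          obtain ⟨h0, hlt⟩ := hmem
          obtain ⟨k, rfl⟩ : ∃ k : Nat, i = (k : Int) := ⟨i.toNat, (Int.toNat_of_nonneg h0).symm⟩
          have hk : k < w.length := by exact_mod_cast hlt
          have := mod_index_eq w K hw k
          simp only [PySem.List.len_eq] at this
          rw [PySem.List.pyGet?_natCast, this]
          exact h k hk
      exact Bool.eq_iff_iff.mpr (by rw [decide_eq_true_eq]; exact hloop)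

-- ===== VERDICT (by name: the statement is the Claim_ definition above) =====
theorem solve_spec : Claim_equal_solve := by
  intro letter K _
  unfold Spec_solve solve solve_alt
  by_cases h : letter.toList = []
  · simp [h]
  · simp only [h]
    rw [PySem.List.foldl_if_add_one (fun w => pvRotateA w K)]
    simp [funext fun w => rotate_eq_invariant w K]
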